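-- pv_equiv track=rewrite | github.com/Aman-Git-hala/Entropy-failure-detection | bilevel_sgd_entropy_v2.py | assign_feature_groups
-- ===== SOURCE A (Python) =====
-- def assign_feature_groups(columns, label_col):
--     """Assign features to 3 semantic groups."""
--     cols = [c for c in columns if c != label_col]
--
--     volume_keywords = [
--         'loc_', 'number_of_lines', 'loc_total', 'loc_blank', 'loc_comment',
--         'loc_code', 'loc_executable', 'percent_comment', 'call_pairs',
--         'parameter_count', 'branch_count'
--     ]
--     complexity_keywords = [
--         'cyclomatic', 'essential', 'design', 'condition', 'decision',
--         'edge_count', 'node_count', 'maintenance', 'modified_condition',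
--         'multiple_condition', 'normalized_cylomatic', 'global_data'
--     ]
--     halstead_keywords = [
--         'halstead', 'num_operand', 'num_operator', 'num_unique',
--         'operand', 'operator'
--     ]
--
--     volume, complexity, halstead = [], [], []
--
--     for col in cols:
--         col_lower = col.lower()
--         if any(k in col_lower for k in halstead_keywords):
--             halstead.append(col)
--         elif any(k in col_lower for k in complexity_keywords):
--             complexity.append(col)
--         elif any(k in col_lower for k in volume_keywords):
--             volume.append(col)
--         else:
--             volume.append(col)
--
--     return volume, complexity, halstead
-- ===== SOURCE B (Python) =====
-- COMPLEXITY_KEYWORDS = [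
--     'cyclomatic', 'essential', 'design', 'condition', 'decision',
--     'edge_count', 'node_count', 'maintenance', 'modified_condition',
--     'multiple_condition', 'normalized_cylomatic', 'global_data'
-- ]
-- HALSTEAD_KEYWORDS = [
--     'halstead', 'num_operand', 'num_operator', 'num_unique',
--     'operand', 'operator'
-- ]
--
-- def _matches(keywords, col):
--     cl = col.lower()
--     return any(k in cl for k in keywords)
--
-- def assign_feature_groups(columns, label_col):
--     """Assign features to 3 semantic groups (three filtering passes)."""
--     cols = [c for c in columns if c != label_col]
--     halstead = [c for c in cols if _matches(HALSTEAD_KEYWORDS, c)]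
--     complexity = [c for c in cols
--                   if not _matches(HALSTEAD_KEYWORDS, c)
--                   and _matches(COMPLEXITY_KEYWORDS, c)]
--     volume = [c for c in cols
--               if not _matches(HALSTEAD_KEYWORDS, c)
--               and not _matches(COMPLEXITY_KEYWORDS, c)]
--     return volume, complexity, halstead
-- ===== Notes on version B (the rewrite author's own statement) =====
-- stated objective: simpler
-- what changed: Replaces the single priority loop with a triple accumulator by three independent filtering passes, one per output group, each later pass re-checking the higher-priority predicates; the redundant volume-keyword test (its branch and the else branch do the same thing) is dropped.
import Mathlib
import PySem

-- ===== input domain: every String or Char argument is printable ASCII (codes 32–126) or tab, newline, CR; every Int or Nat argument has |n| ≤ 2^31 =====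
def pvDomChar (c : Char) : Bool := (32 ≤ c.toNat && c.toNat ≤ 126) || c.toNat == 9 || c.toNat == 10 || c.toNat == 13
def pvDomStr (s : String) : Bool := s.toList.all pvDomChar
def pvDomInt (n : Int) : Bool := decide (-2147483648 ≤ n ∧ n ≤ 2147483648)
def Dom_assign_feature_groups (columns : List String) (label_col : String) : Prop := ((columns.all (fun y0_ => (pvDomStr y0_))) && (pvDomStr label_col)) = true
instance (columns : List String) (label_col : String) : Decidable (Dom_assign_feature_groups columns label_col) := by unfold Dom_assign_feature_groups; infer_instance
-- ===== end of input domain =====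

-- B replaces A's single priority loop by three independent filtering passes (one per group); objective: simpler.

-- ===== PORT A =====
def pvVolumeKeywords : List String :=
  ["loc_", "number_of_lines", "loc_total", "loc_blank", "loc_comment",
   "loc_code", "loc_executable", "percent_comment", "call_pairs",
   "parameter_count", "branch_count"]
def pvComplexityKeywords : List String :=
  ["cyclomatic", "essential", "design", "condition", "decision",
   "edge_count", "node_count", "maintenance", "modified_condition",
   "multiple_condition", "normalized_cylomatic", "global_data"]
def pvHalsteadKeywords : List String :=
  ["halstead", "num_operand", "num_operator", "num_unique",
   "operand", "operator"]

-- A: one loop over cols, appending to one of three accumulators by priority.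
def assign_feature_groups (columns : List String) (label_col : String) : List String × List String × List String :=
  let cols := columns.filter (fun c => c ≠ label_col)
  let res := cols.foldl (fun (acc : List String × List String × List String) col =>
    let col_lower := PySem.Str.lower col
    if pvHalsteadKeywords.any (fun k => PySem.Str.isIn k col_lower) then
      (acc.1, acc.2.1, acc.2.2 ++ [col])
    else if pvComplexityKeywords.any (fun k => PySem.Str.isIn k col_lower) then
      (acc.1, acc.2.1 ++ [col], acc.2.2)
    else if pvVolumeKeywords.any (fun k => PySem.Str.isIn k col_lower) then
      (acc.1 ++ [col], acc.2.1, acc.2.2)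
    else
      (acc.1 ++ [col], acc.2.1, acc.2.2)) ([], [], [])
  res

-- ===== PORT B =====
def pvMatches (keywords : List String) (col : String) : Bool :=
  let cl := PySem.Str.lower col
  keywords.any (fun k => PySem.Str.isIn k cl)

-- B: three filtering passes, one per output list.
def assign_feature_groups_alt (columns : List String) (label_col : String) : List String × List String × List String :=
  let cols := columns.filter (fun c => c ≠ label_col)
  let halstead := cols.filter (fun c => pvMatches pvHalsteadKeywords c)
  let complexity := cols.filter (fun c =>
    !pvMatches pvHalsteadKeywords c && pvMatches pvComplexityKeywords c)
  let volume := cols.filter (fun c =>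
    !pvMatches pvHalsteadKeywords c && !pvMatches pvComplexityKeywords c)
  (volume, complexity, halstead)

-- ===== PRECONDITION & SPEC =====
def Spec_assign_feature_groups (columns : List String) (label_col : String) (out : List String × List String × List String) : Prop := out = assign_feature_groups_alt columns label_col
instance (columns : List String) (label_col : String) (out : List String × List String × List String) : Decidable (Spec_assign_feature_groups columns label_col out) := by unfold Spec_assign_feature_groups; infer_instance

-- ===== CLAIM (what is proved, stated in full; the proofs are below) =====
def Claim_equal_assign_feature_groups : Prop := ∀ (columns : List String) (label_col : String), Dom_assign_feature_groups columns label_col → Spec_assign_feature_groups columns label_col (assign_feature_groups columns label_col)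

-- ===== LEMMAS AND PROOFS =====

-- The fold body's any-condition is pvMatches by definition.
theorem pvMatches_eq (kws : List String) (c : String) :
    (kws.any fun k => PySem.Str.isIn k (PySem.Str.lower c)) = pvMatches kws c := rfl

-- Loop invariant: A's fold over any list, from any accumulator, appends exactly B's three filters.
theorem pv_fold_inv (l : List String) (acc : List String × List String × List String) :
    l.foldl (fun (acc : List String × List String × List String) col =>
      if pvMatches pvHalsteadKeywords col then
        (acc.1, acc.2.1, acc.2.2 ++ [col])
      else if pvMatches pvComplexityKeywords col then
        (acc.1, acc.2.1 ++ [col], acc.2.2)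
      else if pvMatches pvVolumeKeywords col then
        (acc.1 ++ [col], acc.2.1, acc.2.2)
      else
        (acc.1 ++ [col], acc.2.1, acc.2.2)) acc
    = (acc.1 ++ l.filter (fun c => !pvMatches pvHalsteadKeywords c && !pvMatches pvComplexityKeywords c),
       acc.2.1 ++ l.filter (fun c => !pvMatches pvHalsteadKeywords c && pvMatches pvComplexityKeywords c),
       acc.2.2 ++ l.filter (fun c => pvMatches pvHalsteadKeywords c)) := by
  induction l generalizing acc with
  | nil => simp
  | cons x xs ih =>
    simp only [List.foldl_cons, List.filter_cons]
    by_cases hH : pvMatches pvHalsteadKeywords x = true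
    · rw [if_pos hH, ih]
      simp [hH]
    · rw [if_neg hH]
      simp only [Bool.not_eq_true] at hH
      by_cases hC : pvMatches pvComplexityKeywords x = true
      · rw [if_pos hC, ih]
        simp [hH, hC]
      · rw [if_neg hC]
        simp only [Bool.not_eq_true] at hC
        by_cases hV : pvMatches pvVolumeKeywords x = true
        · rw [if_pos hV, ih]
          simp [hH, hC]
        · rw [if_neg hV, ih]
          simp [hH, hC]

-- ===== VERDICT (by name: the statement is the Claim_ definition above) =====
theorem assign_feature_groups_spec : Claim_equal_assign_feature_groups := by
  intro columns label_col _
  unfold Spec_assign_feature_groups assign_feature_groups assign_feature_groups_alt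
  simp only [pvMatches_eq]
  simpa using pv_fold_inv (columns.filter fun c => decide (c ≠ label_col)) ([], [], [])
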